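-- pv_equiv track=rewrite | github.com/gregoryann/Python-Beginner-Examples | Edabit +1500 Python Challenges/V Easy/Omnipresent Value.py | is_omnipresent
-- ===== SOURCE A (Python) =====
-- def is_omnipresent(lst, val):
-- 	arr = []
-- 	for n in lst:
-- 		if val in n:
-- 			arr.append(True)
-- 		else:
-- 			arr.append(False)
-- 	return all(arr)
-- ===== SOURCE B (Python) =====
-- def is_omnipresent(lst, val):
-- 	if not lst:
-- 		return True
-- 	common = set(lst[0])
-- 	for n in lst[1:]:
-- 		common &= set(n)
-- 	return val in common
-- ===== Notes on version B (the rewrite author's own statement) =====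
-- stated objective: alternative
-- what changed: B computes the set intersection of all sublists (a running common-elements set, intersected with each sublist) and performs a single membership test of val at the end, instead of testing val's membership in each sublist and folding booleans with all().
import Mathlib
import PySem

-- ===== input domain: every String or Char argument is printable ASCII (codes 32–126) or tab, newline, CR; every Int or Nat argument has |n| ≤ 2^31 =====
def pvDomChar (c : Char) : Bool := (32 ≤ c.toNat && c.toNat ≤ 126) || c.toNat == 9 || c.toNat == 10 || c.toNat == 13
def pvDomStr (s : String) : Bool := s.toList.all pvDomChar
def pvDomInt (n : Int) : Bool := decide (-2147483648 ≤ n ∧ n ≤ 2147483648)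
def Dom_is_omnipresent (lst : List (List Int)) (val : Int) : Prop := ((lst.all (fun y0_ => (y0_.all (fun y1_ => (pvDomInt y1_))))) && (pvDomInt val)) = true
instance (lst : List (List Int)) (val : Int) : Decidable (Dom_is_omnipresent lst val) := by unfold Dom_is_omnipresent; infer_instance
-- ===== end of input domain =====

-- B computes the intersection of all sublists as a set and tests val's membership once, instead of folding a boolean per sublist with all(): an alternative algorithm of similar cost.


-- ===== PORT A =====
-- A: build arr of booleans (True iff val ∈ n) by a loop, then all(arr)
def is_omnipresent (lst : List (List Int)) (val : Int) : Bool :=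
  let arr := lst.foldl (fun arr n => if n.contains val then arr ++ [true] else arr ++ [false]) []
  arr.all (fun b => b)

-- ===== PORT B =====
-- B: empty list → True; else common = set(lst[0]); for n in lst[1:]: common &= set(n); return val in common
def is_omnipresent_alt (lst : List (List Int)) (val : Int) : Bool :=
  match lst with
  | [] => true
  | h :: t =>
    let common := t.foldl (fun c n => PySem.Set.inter c (PySem.Set.ofList n)) (PySem.Set.ofList h)
    PySem.Set.contains common val

-- ===== PRECONDITION & SPEC =====
def Spec_is_omnipresent (lst : List (List Int)) (val : Int) (out : Bool) : Prop := out = is_omnipresent_alt lst val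
instance (lst : List (List Int)) (val : Int) (out : Bool) : Decidable (Spec_is_omnipresent lst val out) := by unfold Spec_is_omnipresent; infer_instance

-- ===== CLAIM (what is proved, stated in full; the proofs are below) =====
def Claim_equal_is_omnipresent : Prop := ∀ (lst : List (List Int)) (val : Int), Dom_is_omnipresent lst val → Spec_is_omnipresent lst val (is_omnipresent lst val)

-- ===== LEMMAS AND PROOFS =====

-- A's accumulating loop, started from any prefix: the result is the prefix followed by the map.
theorem pvA_foldl_map (lst : List (List Int)) (val : Int) (acc : List Bool) :
    lst.foldl (fun arr n => if n.contains val then arr ++ [true] else arr ++ [false]) acc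
      = acc ++ lst.map (fun n => n.contains val) := by
  induction lst generalizing acc with
  | nil => simp
  | cons h t ih =>
    simp only [List.foldl_cons, List.map_cons]
    by_cases hc : h.contains val
    · rw [if_pos hc, ih, List.append_assoc]
      simp only [List.contains_eq_mem, decide_eq_true_eq] at hc
      simp [hc]
    · rw [if_neg hc, ih, List.append_assoc]
      simp only [List.contains_eq_mem, decide_eq_true_eq] at hc
      simp [hc]

-- membership in B's running intersection: val is in the final common set iff it is in the
-- starting set and in every sublist intersected in.
theorem pvB_mem_fold (t : List (List Int)) (val : Int) (c : PySem.Set Int) :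
    (val ∈ t.foldl (fun c n => PySem.Set.inter c (PySem.Set.ofList n)) c)
      ↔ (val ∈ c ∧ ∀ n ∈ t, val ∈ n) := by
  induction t generalizing c with
  | nil => simp
  | cons h tl ih =>
    simp only [List.foldl_cons]
    rw [ih]
    constructor
    · rintro ⟨hm, hall⟩
      rw [PySem.Set.mem_inter] at hm
      exact ⟨hm.1, fun n hn => by
        rw [List.mem_cons] at hn
        rcases hn with hn | hn
        · subst hn; simpa [PySem.Set.mem_ofList] using hm.2
        · exact hall n hn⟩
    · rintro ⟨hc, hall⟩
      refine ⟨?_, fun n hn => hall n (List.mem_cons_of_mem _ hn)⟩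
      rw [PySem.Set.mem_inter, PySem.Set.mem_ofList]
      exact ⟨hc, hall h (List.mem_cons_self ..)⟩

theorem is_omnipresent_eq (lst : List (List Int)) (val : Int) :
    is_omnipresent lst val = is_omnipresent_alt lst val := by
  unfold is_omnipresent is_omnipresent_alt
  rw [pvA_foldl_map]
  cases lst with
  | nil => simp
  | cons h t =>
    simp only [List.nil_append, List.all_map, Function.comp_def]
    rw [Bool.eq_iff_iff]
    simp only [List.all_eq_true, List.contains_eq_mem, decide_eq_true_eq,
      PySem.Set.contains, pvB_mem_fold, PySem.Set.mem_ofList]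
    constructor
    · intro hall
      exact ⟨hall h (List.mem_cons_self ..), fun n hn => hall n (List.mem_cons_of_mem _ hn)⟩
    · rintro ⟨hh, ht⟩ n hn
      rw [List.mem_cons] at hn
      rcases hn with hn | hn
      · subst hn; exact hh
      · exact ht n hn

-- ===== VERDICT (by name: the statement is the Claim_ definition above) =====
theorem is_omnipresent_spec : Claim_equal_is_omnipresent := by
  intro lst val _
  exact is_omnipresent_eq lst val
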